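-- pv_equiv track=rewrite | github.com/cxz5309/coding-test-Team | 이성묵/DP/2208#보석줍기/main.py | solution
-- ===== SOURCE A (Python) =====
-- def solution(n, m, a):
--     dp = [0] * (n + 1)
--     for i in range(n - 1, m - 1, -1):  # i번째 부터 선택할수 있는 부분배열의 합중 최대 값 테이블채우기
--         dp[i] = max(dp[i + 1] + a[i], a[i], 0)
--
--     r = [0]
--     p = sum(a[:m])
--     i = m
--     while i < n:
--         r.append(p + dp[i])
--         p += a[i] - a[i - m]  # 길이 m 부분배열의 합
--         i += 1
--
--     return max(r)
-- ===== SOURCE B (Python) =====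
-- def solution(n, m, a):
--     pre = [0]
--     for x in a:
--         pre.append(pre[-1] + x)
--     best = 0
--     chain = 0
--     for i in range(n - 1, m - 1, -1):
--         chain = max(chain + a[i], a[i], 0)
--         best = max(best, pre[i] - pre[i - m] + chain)
--     return best
-- ===== Notes on version B (the rewrite author's own statement) =====
-- stated objective: alternative
-- what changed: B replaces A's dp table plus forward incremental sliding-window loop by a prefix-sum array and a single backward scan that keeps the suffix-chain DP in one O(1) 'chain' variable and a running max.
-- outside the precondition, e.g. on solution(2, -1, [5, -2, 4]): A returns 12, B returns 16
import Mathlib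
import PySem

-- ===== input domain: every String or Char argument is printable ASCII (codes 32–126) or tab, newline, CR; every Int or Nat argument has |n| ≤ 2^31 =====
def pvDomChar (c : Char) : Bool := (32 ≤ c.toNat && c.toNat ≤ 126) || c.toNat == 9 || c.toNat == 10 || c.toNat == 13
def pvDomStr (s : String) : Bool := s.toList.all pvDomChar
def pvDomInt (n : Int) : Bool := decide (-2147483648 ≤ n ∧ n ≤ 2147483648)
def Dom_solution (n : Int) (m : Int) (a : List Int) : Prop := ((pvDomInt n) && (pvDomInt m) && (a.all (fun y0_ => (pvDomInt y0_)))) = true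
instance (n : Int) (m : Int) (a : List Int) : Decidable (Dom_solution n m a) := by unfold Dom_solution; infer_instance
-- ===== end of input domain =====

-- B replaces A's dp table + forward incremental sliding window by a prefix-sum array and one
-- backward scan fusing the suffix-chain DP into an O(1) variable (alternative, same O(n) cost).

-- ===== PORT A =====
-- Python max(x, y, z) on ints
def pyMax3 (x y z : Int) : Int := max (max x y) z

def solution (n : Int) (m : Int) (a : List Int) : Int :=
  -- dp = [0] * (n + 1); for i in range(n-1, m-1, -1): dp[i] = max(dp[i+1] + a[i], a[i], 0)
  let dp := (PySem.List.pyRange (n - 1) (m - 1) (-1)).foldl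
    (fun dp i =>
      PySem.List.pySetD dp i
        (pyMax3 (PySem.List.pyGetD dp (i + 1) 0 + PySem.List.pyGetD a i 0)
                (PySem.List.pyGetD a i 0) 0))
    (List.replicate (n + 1).toNat 0)
  -- r = [0]; p = sum(a[:m]); i = m; while i < n: r.append(p + dp[i]); p += a[i] - a[i-m]; i += 1
  let st := (PySem.List.pyRange m n 1).foldl
    (fun (st : List Int × Int) i =>
      (st.1 ++ [st.2 + PySem.List.pyGetD dp i 0],
       st.2 + (PySem.List.pyGetD a i 0 - PySem.List.pyGetD a (i - m) 0)))
    ([0], (PySem.List.slice a none (some m)).sum)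
  -- return max(r)
  (PySem.List.max? st.1 (fun x => x)).getD 0

-- ===== PORT B =====
def solution_alt (n : Int) (m : Int) (a : List Int) : Int :=
  -- pre = [0]; for x in a: pre.append(pre[-1] + x)
  let pre := a.foldl (fun pre x => pre ++ [PySem.List.pyGetD pre (-1) 0 + x]) [(0 : Int)]
  -- best = 0; chain = 0; for i in range(n-1, m-1, -1): chain = max(chain + a[i], a[i], 0);
  --   best = max(best, pre[i] - pre[i-m] + chain)
  let st := (PySem.List.pyRange (n - 1) (m - 1) (-1)).foldl
    (fun (st : Int × Int) i =>
      let chain := max (max (st.2 + PySem.List.pyGetD a i 0) (PySem.List.pyGetD a i 0)) 0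
      (max st.1 (PySem.List.pyGetD pre i 0 - PySem.List.pyGetD pre (i - m) 0 + chain), chain))
    (0, 0)
  st.1

-- ===== PRECONDITION & SPEC =====
-- Pre_ excludes inputs with m < n where n > len(a) (A raises IndexError) or m < 0 (A's value
-- comes from accidental negative-index wraparound, outside the problem's 0 ≤ m domain);
-- when n ≤ m both loops are empty, so those inputs are kept regardless.
def Pre_solution (n : Int) (m : Int) (a : List Int) : Prop :=
  (0 ≤ m ∧ n ≤ (a.length : Int)) ∨ n ≤ m
instance (n : Int) (m : Int) (a : List Int) : Decidable (Pre_solution n m a) := by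
  unfold Pre_solution; infer_instance

def pvWitness_solution : Int × Int × List Int := (5, 2, [1, -2, 3, -1, 4])

def Spec_solution (n : Int) (m : Int) (a : List Int) (out : Int) : Prop := out = solution_alt n m a
instance (n : Int) (m : Int) (a : List Int) (out : Int) : Decidable (Spec_solution n m a out) := by
  unfold Spec_solution; infer_instance

-- ===== CLAIM (what is proved, stated in full; the proofs are below) =====
def Claim_equal_solution : Prop := ∀ (n : Int) (m : Int) (a : List Int),
  Dom_solution n m a → Pre_solution n m a → Spec_solution n m a (solution n m a)

-- ===== LEMMAS AND PROOFS =====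

-- suffix chain value: gch N j = dp[j] of A's first loop (0 for j ≥ N)
def gch (a : List Int) (N : Nat) (j : Nat) : Int :=
  if _h : j < N then max (max (gch a N (j + 1) + a.getD j 0) (a.getD j 0)) 0 else 0
termination_by N - j

-- prefix sum
def prefI (a : List Int) (i : Int) : Int := (a.take i.toNat).sum

-- window+chain value at index i
def wv (a : List Int) (m : Int) (N : Nat) (i : Int) : Int :=
  prefI a i - prefI a (i - m) + gch a N i.toNat

theorem gch_of_ge (a : List Int) (N j : Nat) (h : N ≤ j) : gch a N j = 0 := by
  unfold gch; simp [Nat.not_lt.mpr h]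

theorem gch_of_lt (a : List Int) (N j : Nat) (h : j < N) :
    gch a N j = max (max (gch a N (j + 1) + a.getD j 0) (a.getD j 0)) 0 := by
  conv_lhs => unfold gch
  simp [h]

theorem foldl_max_comm (t : List Int) : ∀ b x : Int, t.foldl max (max b x) = max (t.foldl max b) x := by
  induction t with
  | nil => intro b x; simp
  | cons y t ih =>
    intro b x
    simp only [List.foldl_cons]
    rw [max_right_comm b x y]
    exact ih (max b y) x

theorem foldl_max_reverse (t : List Int) : ∀ b : Int, t.reverse.foldl max b = t.foldl max b := by
  induction t with
  | nil => intro b; rfl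
  | cons x t ih =>
    intro b
    simp only [List.reverse_cons, List.foldl_append, List.foldl_cons, List.foldl_nil, ih,
      List.foldl_cons]
    rw [← foldl_max_comm]


-- ----- A side: the dp-table loop computes gch on [m, n] -----
theorem dpA_loop (a : List Int) (m n : Int) (hm : 0 ≤ m) (hn : n ≤ (a.length : Int)) :
    ∀ (fuel : Nat) (k : Int), (k - (m - 1)).toNat = fuel → m - 1 ≤ k → k ≤ n - 1 →
    ∀ dp0 : List Int, dp0.length = (n + 1).toNat →
    (∀ j : Nat, k < (j : Int) → (j : Int) ≤ n → dp0.getD j 0 = gch a n.toNat j) →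
    (((PySem.List.pyRange k (m - 1) (-1)).foldl
        (fun dp i => PySem.List.pySetD dp i
          (pyMax3 (PySem.List.pyGetD dp (i + 1) 0 + PySem.List.pyGetD a i 0)
                  (PySem.List.pyGetD a i 0) 0)) dp0).length = (n + 1).toNat ∧
     ∀ j : Nat, m ≤ (j : Int) → (j : Int) ≤ n →
       ((PySem.List.pyRange k (m - 1) (-1)).foldl
        (fun dp i => PySem.List.pySetD dp i
          (pyMax3 (PySem.List.pyGetD dp (i + 1) 0 + PySem.List.pyGetD a i 0)
                  (PySem.List.pyGetD a i 0) 0)) dp0).getD j 0 = gch a n.toNat j) := by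
  intro fuel
  induction fuel with
  | zero =>
    intro k hf hk1 hk2 dp0 hl hinv
    have hke : k = m - 1 := by omega
    subst hke
    rw [PySem.List.pyRange_neg_one_eq_nil le_rfl]
    exact ⟨hl, fun j hj1 hj2 => hinv j (by omega) hj2⟩
  | succ fuel ih =>
    intro k hf hk1 hk2 dp0 hl hinv
    have hk : m - 1 < k := by omega
    rw [PySem.List.pyRange_neg_one_cons hk]
    simp only [List.foldl_cons]
    have h0k : 0 ≤ k := by omega
    have hkn : k < n := by omega
    have hk1n : ((k + 1).toNat : Int) = k + 1 := by omega
    have hsucc : (k + 1).toNat = k.toNat + 1 := by omega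
    -- the written value is gch at k
    have hget1 : PySem.List.pyGetD dp0 (k + 1) 0 = gch a n.toNat (k + 1).toNat := by
      rw [PySem.List.pyGetD_eq_getElem dp0 0 (by omega) (by omega),
        ← List.getD_eq_getElem dp0 0 (by omega)]
      exact hinv (k + 1).toNat (by omega) (by omega)
    have hgeta : PySem.List.pyGetD a k 0 = a.getD k.toNat 0 := by
      rw [PySem.List.pyGetD_eq_getElem a 0 h0k (by omega),
        ← List.getD_eq_getElem a 0 (by omega)]
    have hv : pyMax3 (PySem.List.pyGetD dp0 (k + 1) 0 + PySem.List.pyGetD a k 0)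
        (PySem.List.pyGetD a k 0) 0 = gch a n.toNat k.toNat := by
      rw [hget1, hgeta, gch_of_lt a n.toNat k.toNat (by omega), hsucc]
      rfl
    rw [PySem.List.pySetD_of_nonneg dp0 _ h0k, hv]
    apply ih (k - 1) (by omega) (by omega) (by omega)
    · simp [hl]
    · intro j hj1 hj2
      have hjlen : j < (dp0.set k.toNat (gch a n.toNat k.toNat)).length := by
        simp [hl]; omega
      rw [List.getD_eq_getElem _ 0 hjlen]
      by_cases hjk : j = k.toNat
      · subst hjk
        rw [List.getElem_set_self hjlen]
      · rw [List.getElem_set_ne (fun h => hjk h.symm) hjlen,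
          ← List.getD_eq_getElem dp0 0 (by simp at hjlen; omega)]
        exact hinv j (by omega) hj2

theorem prefI_succ (a : List Int) (i : Int) (h0 : 0 ≤ i) (h1 : i < (a.length : Int)) :
    prefI a (i + 1) = prefI a i + a.getD i.toNat 0 := by
  unfold prefI
  have ht : (i + 1).toNat = i.toNat + 1 := by omega
  have hlt : i.toNat < a.length := by omega
  rw [ht, List.take_add_one, List.sum_append, List.getElem?_eq_getElem hlt,
    List.getD_eq_getElem a 0 hlt]
  simp

-- ----- A side: the while loop appends the window+chain values in ascending order -----
theorem rA_loop (a dp : List Int) (m n : Int) (hm : 0 ≤ m) (hn : n ≤ (a.length : Int))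
    (hlen : dp.length = (n + 1).toNat)
    (hdp : ∀ j : Nat, m ≤ (j : Int) → (j : Int) ≤ n → dp.getD j 0 = gch a n.toNat j) :
    ∀ (fuel : Nat) (k : Int), (n - k).toNat = fuel → m ≤ k →
    ∀ (r0 : List Int) (p0 : Int), p0 = prefI a k - prefI a (k - m) →
    ((PySem.List.pyRange k n 1).foldl
      (fun (st : List Int × Int) i =>
        (st.1 ++ [st.2 + PySem.List.pyGetD dp i 0],
         st.2 + (PySem.List.pyGetD a i 0 - PySem.List.pyGetD a (i - m) 0))) (r0, p0)).1
      = r0 ++ (PySem.List.pyRange k n 1).map (wv a m n.toNat) := by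
  intro fuel
  induction fuel with
  | zero =>
    intro k hf hk r0 p0 hp
    rw [PySem.List.pyRange_one_eq_nil (by omega)]
    simp
  | succ fuel ih =>
    intro k hf hk r0 p0 hp
    have hkn : k < n := by omega
    rw [PySem.List.pyRange_one_cons hkn]
    simp only [List.foldl_cons, List.map_cons]
    have h0k : 0 ≤ k := by omega
    have hgetd : PySem.List.pyGetD dp k 0 = gch a n.toNat k.toNat := by
      rw [PySem.List.pyGetD_eq_getElem dp 0 h0k (by omega),
        ← List.getD_eq_getElem dp 0 (by omega)]
      exact hdp k.toNat (by omega) (by omega)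
    have hgeta : PySem.List.pyGetD a k 0 = a.getD k.toNat 0 := by
      rw [PySem.List.pyGetD_eq_getElem a 0 h0k (by omega),
        ← List.getD_eq_getElem a 0 (by omega)]
    have hgetb : PySem.List.pyGetD a (k - m) 0 = a.getD (k - m).toNat 0 := by
      rw [PySem.List.pyGetD_eq_getElem a 0 (by omega) (by omega),
        ← List.getD_eq_getElem a 0 (by omega)]
    have hwv : p0 + PySem.List.pyGetD dp k 0 = wv a m n.toNat k := by
      rw [hgetd, hp]; rfl
    have hp1 : p0 + (PySem.List.pyGetD a k 0 - PySem.List.pyGetD a (k - m) 0)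
        = prefI a (k + 1) - prefI a (k + 1 - m) := by
      rw [hgeta, hgetb, hp, prefI_succ a k h0k (by omega),
        show k + 1 - m = (k - m) + 1 by ring,
        prefI_succ a (k - m) (by omega) (by omega)]
      ring
    rw [hwv, hp1, ih (k + 1) (by omega) (by omega) (r0 ++ [wv a m n.toNat k]) _ rfl]
    simp

-- ----- B side: the prefix-sum list -----
theorem preB_fold (l : List Int) :
    ∀ (acc : List Int) (s : Int) (h : acc ≠ []), acc.getLast h = s →
    l.foldl (fun pre x => pre ++ [PySem.List.pyGetD pre (-1) 0 + x]) acc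
      = acc ++ (List.range l.length).map (fun j => s + (l.take (j + 1)).sum) := by
  induction l with
  | nil => intro acc s h hs; simp
  | cons x tl ih =>
    intro acc s h hs
    simp only [List.foldl_cons]
    rw [PySem.List.pyGetD_neg_one acc 0 h, hs]
    rw [ih (acc ++ [s + x]) (s + x) (by simp) (by simp)]
    rw [List.append_assoc]
    congr 1
    simp only [List.length_cons, List.range_succ_eq_map, List.map_cons, List.map_map,
      List.singleton_append, List.take_succ_cons, List.sum_cons, List.take_zero, List.sum_nil]
    congr 1
    · ring
    · apply List.map_congr_left
      intro j _
      simp [Function.comp]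
      ring

theorem pre_spec (a : List Int) :
    (a.foldl (fun pre x => pre ++ [PySem.List.pyGetD pre (-1) 0 + x]) [(0 : Int)]).length
        = a.length + 1 ∧
    ∀ j : Nat, j ≤ a.length →
      (a.foldl (fun pre x => pre ++ [PySem.List.pyGetD pre (-1) 0 + x]) [(0 : Int)]).getD j 0
        = (a.take j).sum := by
  rw [preB_fold a [(0 : Int)] 0 (by simp) (by simp)]
  constructor
  · simp
  · intro j hj
    match j with
    | 0 => simp
    | k + 1 =>
      have hk : k < a.length := by omega
      have hlen : k < (List.map (fun j => 0 + (a.take (j + 1)).sum) (List.range a.length)).length := by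
        simpa using hk
      rw [List.singleton_append, List.getD_cons_succ,
        List.getD_eq_getElem _ 0 hlen]
      simp

-- ----- B side: the backward fused scan is a running max of the same values -----
theorem bB_loop (a pre : List Int) (m n : Int) (hm : 0 ≤ m) (hn : n ≤ (a.length : Int))
    (hplen : pre.length = a.length + 1)
    (hpre : ∀ j : Nat, j ≤ a.length → pre.getD j 0 = (a.take j).sum) :
    ∀ (fuel : Nat) (k : Int), (k - (m - 1)).toNat = fuel → m - 1 ≤ k → k ≤ n - 1 →
    ∀ (b0 c0 : Int), c0 = gch a n.toNat (k + 1).toNat →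
    ((PySem.List.pyRange k (m - 1) (-1)).foldl
      (fun (st : Int × Int) i =>
        let chain := max (max (st.2 + PySem.List.pyGetD a i 0) (PySem.List.pyGetD a i 0)) 0
        (max st.1 (PySem.List.pyGetD pre i 0 - PySem.List.pyGetD pre (i - m) 0 + chain), chain))
      (b0, c0)).1
    = (PySem.List.pyRange k (m - 1) (-1)).foldl (fun b i => max b (wv a m n.toNat i)) b0 := by
  intro fuel
  induction fuel with
  | zero =>
    intro k hf hk1 hk2 b0 c0 hc
    rw [PySem.List.pyRange_neg_one_eq_nil (by omega)]
    rfl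
  | succ fuel ih =>
    intro k hf hk1 hk2 b0 c0 hc
    have hk : m - 1 < k := by omega
    have h0k : 0 ≤ k := by omega
    have hkn : k < n := by omega
    rw [PySem.List.pyRange_neg_one_cons hk]
    simp only [List.foldl_cons]
    have hgeta : PySem.List.pyGetD a k 0 = a.getD k.toNat 0 := by
      rw [PySem.List.pyGetD_eq_getElem a 0 h0k (by omega),
        ← List.getD_eq_getElem a 0 (by omega)]
    have hchain : max (max (c0 + PySem.List.pyGetD a k 0) (PySem.List.pyGetD a k 0)) 0
        = gch a n.toNat k.toNat := by
      rw [hgeta, hc, gch_of_lt a n.toNat k.toNat (by omega),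
        show (k + 1).toNat = k.toNat + 1 by omega]
    have hgp1 : PySem.List.pyGetD pre k 0 = prefI a k := by
      rw [PySem.List.pyGetD_eq_getElem pre 0 h0k (by omega),
        ← List.getD_eq_getElem pre 0 (by omega)]
      exact hpre k.toNat (by omega)
    have hgp2 : PySem.List.pyGetD pre (k - m) 0 = prefI a (k - m) := by
      rw [PySem.List.pyGetD_eq_getElem pre 0 (by omega) (by omega),
        ← List.getD_eq_getElem pre 0 (by omega)]
      exact hpre (k - m).toNat (by omega)
    simp only [hchain, hgp1, hgp2]
    rw [ih (k - 1) (by omega) (by omega) (by omega)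
      (max b0 (prefI a k - prefI a (k - m) + gch a n.toNat k.toNat))
      (gch a n.toNat k.toNat)
      (by rw [show k - 1 + 1 = k by ring])]
    rfl

theorem solution_spec : Claim_equal_solution := by
  unfold Claim_equal_solution
  intro n m a _hdom hpre
  unfold Spec_solution
  by_cases hmn : n ≤ m
  · simp only [solution, solution_alt]
    rw [PySem.List.pyRange_neg_one_eq_nil (by omega : n - 1 ≤ m - 1),
      PySem.List.pyRange_one_eq_nil hmn]
    simp [PySem.List.max?_id_cons]
  · push Not at hmn
    obtain ⟨hm, hn⟩ : 0 ≤ m ∧ n ≤ (a.length : Int) := by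
      rcases hpre with h | h
      · exact h
      · omega
    obtain ⟨hlen, hdp⟩ := dpA_loop a m n hm hn (n - 1 - (m - 1)).toNat (n - 1) rfl
      (by omega) (by omega) (List.replicate (n + 1).toNat 0) (by simp)
      (fun j hj1 hj2 => by
        have h1 : (List.replicate (n + 1).toNat (0 : Int)).getD j 0 = 0 := by
          simp [List.getD]
        rw [h1, gch_of_ge a n.toNat j (by omega)])
    obtain ⟨hplen, hpreL⟩ := pre_spec a
    simp only [solution, solution_alt]
    rw [rA_loop a _ m n hm hn hlen hdp (n - m).toNat m rfl le_rfl [0] _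
      (by rw [PySem.List.slice_to a hm]; simp [prefI])]
    rw [bB_loop a _ m n hm hn hplen hpreL (n - 1 - (m - 1)).toNat (n - 1) rfl
      (by omega) (by omega) 0 0
      (by rw [gch_of_ge a n.toNat (n - 1 + 1).toNat (by omega)])]
    rw [List.singleton_append, PySem.List.max?_id_cons, Option.getD_some]
    rw [PySem.List.pyRange_neg_one_eq_reverse (n - 1) (m - 1),
      show m - 1 + 1 = m by ring, show n - 1 + 1 = n by ring]
    rw [← List.foldl_map (f := wv a m n.toNat) (g := fun (b x : Int) => max b x),
      List.map_reverse]
    exact (foldl_max_reverse _ 0).symm
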